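-- pv_equiv track=rewrite | github.com/SimSimEEE/crafton_jungle_algorithm | 프로그래머스/lv3/64064. 불량 사용자/불량 사용자.py | solution
-- ===== SOURCE A (Python) =====
-- from itertools import product
--
-- def solution(user_id, banned_id):
--     answer = 0
--     banned_idArr = [[] for _ in range(len(banned_id))]
--
--     for i, bid in enumerate(banned_id):
--         for uid in user_id:
--             correct = True
--             if len(uid) != len(bid):
--                 correct = False
--             else:
--                 for idx, _ in enumerate(bid):
--                     if bid[idx] != '*':
--                         if bid[idx] != uid[idx]:
--                             correct = False
--                             break
--                 if correct:
--                     banned_idArr[i].append(uid)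
--
--     unique_combinations = set()
--
--     for combination in product(*banned_idArr):
--         if len(set(combination)) == len(combination):
--             unique_combinations.add(tuple(sorted(combination)))
--
--     return len(unique_combinations)
-- ===== SOURCE B (Python) =====
-- def solution(user_id, banned_id):
--     def matches(uid, bid):
--         return len(uid) == len(bid) and all(b == '*' or b == u for u, b in zip(uid, bid))
--
--     cands = [[u for u in user_id if matches(u, b)] for b in banned_id]
--     results = set()
--
--     def dfs(i, used):
--         if i == len(cands):
--             results.add(frozenset(used))
--             return
--         for u in cands[i]:
--             if u not in used:
--                 used.append(u)
--                 dfs(i + 1, used)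
--                 used.pop()
--
--     dfs(0, [])
--     return len(results)
-- ===== Notes on version B (the rewrite author's own statement) =====
-- stated objective: alternative
-- what changed: A materialises the full cartesian product of all per-pattern candidate lists and filters out tuples with repeated users afterwards; B does DFS backtracking over the patterns with a used-set, pruning any branch that reuses a user, and dedups results by frozenset.
import Mathlib
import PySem

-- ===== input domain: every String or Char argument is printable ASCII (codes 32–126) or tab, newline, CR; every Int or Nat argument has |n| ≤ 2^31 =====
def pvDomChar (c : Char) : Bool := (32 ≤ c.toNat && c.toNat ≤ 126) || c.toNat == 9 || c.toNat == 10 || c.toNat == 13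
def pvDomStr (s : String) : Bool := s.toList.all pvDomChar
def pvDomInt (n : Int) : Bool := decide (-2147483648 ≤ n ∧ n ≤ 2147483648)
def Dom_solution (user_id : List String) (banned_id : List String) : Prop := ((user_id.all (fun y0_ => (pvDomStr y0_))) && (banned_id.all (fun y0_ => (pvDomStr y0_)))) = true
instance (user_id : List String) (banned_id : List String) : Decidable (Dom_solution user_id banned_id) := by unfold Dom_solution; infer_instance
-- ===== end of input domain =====

-- B replaces A's full cartesian-product enumeration by DFS backtracking with a used-set
-- (prunes repeated users early; dedup by frozenset); alternative algorithm, same exact result.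

-- ===== PORT A =====
-- inner 'for idx in enumerate(bid)' loop with break; lengths are equal when called
def pvCheckA : List Char → List Char → Bool
  | [], _ => true
  | _ :: _, [] => true   -- unreachable when lengths are equal
  | b :: bs, u :: us =>
      if b ≠ '*' then (if b ≠ u then false else pvCheckA bs us) else pvCheckA bs us

def pvMatchA (uid bid : String) : Bool :=
  if uid.toList.length ≠ bid.toList.length then false else pvCheckA bid.toList uid.toList

-- itertools.product(*arrs): leftmost factor varies slowest (exact order)
def pyProduct : List (List String) → List (List String)
  | [] => [[]]
  | l :: ls => l.flatMap (fun x => (pyProduct ls).map (x :: ·))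

def solution (user_id : List String) (banned_id : List String) : Int :=
  -- banned_idArr, then the fold over product(*banned_idArr) into the set of sorted tuples
  (((pyProduct
      (banned_id.foldl
        (fun arr bid =>
          arr ++ [user_id.foldl (fun l uid => if pvMatchA uid bid then l ++ [uid] else l) []])
        [])).foldl
      (fun s comb =>
        if (PySem.Set.ofList comb).length == comb.length
        then PySem.Set.add s (PySem.List.sorted comb (fun x => x) false)
        else s)
      PySem.Set.empty).length : Int)

-- ===== PORT B =====
def pvMatchB (uid bid : String) : Bool :=
  uid.toList.length == bid.toList.length
    && (uid.toList.zip bid.toList).all (fun p => p.2 == '*' || p.2 == p.1)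

mutual
-- frozenset(used) is represented by its sorted element list: exact, since 'used' holds distinct strings
def pvDfs : List (List String) → List String → PySem.Set (List String) → PySem.Set (List String)
  | [], used, res => PySem.Set.add res (PySem.List.sorted used (fun x => x) false)
  | l :: ls, used, res => pvDfsRow l ls used res

def pvDfsRow : List String → List (List String) → List String → PySem.Set (List String) → PySem.Set (List String)
  | [], _, _, res => res
  | u :: l, ls, used, res =>
      pvDfsRow l ls used (if used.contains u then res else pvDfs ls (used ++ [u]) res)
end

def solution_alt (user_id : List String) (banned_id : List String) : Int :=
  ((pvDfs (banned_id.map (fun b => user_id.filter (fun u => pvMatchB u b))) [] PySem.Set.empty).length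
    : Int)

-- ===== PRECONDITION & SPEC =====
def Spec_solution (user_id : List String) (banned_id : List String) (out : Int) : Prop := out = solution_alt user_id banned_id
instance (user_id : List String) (banned_id : List String) (out : Int) : Decidable (Spec_solution user_id banned_id out) := by unfold Spec_solution; infer_instance

-- ===== CLAIM (what is proved, stated in full; the proofs are below) =====
def Claim_equal_solution : Prop := ∀ (user_id : List String) (banned_id : List String), Dom_solution user_id banned_id → Spec_solution user_id banned_id (solution user_id banned_id)

-- ===== LEMMAS AND PROOFS =====

-- the two matchers agree
theorem checkA_eq (bs us : List Char) (h : bs.length = us.length) :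
    pvCheckA bs us = (us.zip bs).all (fun p => p.2 == '*' || p.2 == p.1) := by
  induction bs generalizing us with
  | nil => cases us with
    | nil => simp [pvCheckA]
    | cons u us => simp at h
  | cons b bs ih =>
    cases us with
    | nil => simp at h
    | cons u us =>
      simp only [List.length_cons, Nat.add_right_cancel_iff] at h
      simp only [pvCheckA, List.zip_cons_cons, List.all_cons]
      by_cases hb : b = '*'
      · simp [hb, ih _ h]
      · by_cases hu : b = u <;> simp [hb, hu, ih _ h]

theorem matchA_eq (uid bid : String) : pvMatchA uid bid = pvMatchB uid bid := by
  unfold pvMatchA pvMatchB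
  by_cases h : uid.toList.length = bid.toList.length
  · simp [h, checkA_eq _ _ h.symm]
  · have h' : ¬ uid.length = bid.length := by simpa using h
    simp [h']

-- A's candidate-building fold equals B's map-of-filters
theorem rowA_eq (user_id : List String) (bid : String) (acc : List String) :
    user_id.foldl (fun l uid => if pvMatchA uid bid then l ++ [uid] else l) acc
      = acc ++ user_id.filter (fun u => pvMatchA u bid) := by
  induction user_id generalizing acc with
  | nil => simp
  | cons u us ih =>
    simp only [List.foldl_cons, List.filter_cons]
    by_cases h : pvMatchA u bid <;> simp [h, ih]

theorem arrs_eq (user_id banned_id : List String) (acc : List (List String)) :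
    banned_id.foldl
      (fun arr bid =>
        arr ++ [user_id.foldl (fun l uid => if pvMatchA uid bid then l ++ [uid] else l) []]) acc
      = acc ++ banned_id.map (fun b => user_id.filter (fun u => pvMatchB u b)) := by
  induction banned_id generalizing acc with
  | nil => simp
  | cons b bs ih =>
    rw [List.foldl_cons, ih, rowA_eq, List.nil_append, List.map_cons, List.append_assoc,
        List.singleton_append, List.filter_congr (fun u _ => matchA_eq u b)]

-- set(ofList) is a sublist, so its length equals the list's length iff the list has no duplicates
theorem ofList_sublist {α : Type} [BEq α] [LawfulBEq α] (xs : List α) :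
    (PySem.Set.ofList xs).Sublist xs := by
  induction xs with
  | nil => simp [PySem.Set.ofList_nil]
  | cons x xs ih =>
    rw [PySem.Set.ofList_cons]
    refine List.Sublist.cons₂ x (List.Sublist.trans ?_ ih)
    simp only [PySem.Set.discard]
    exact List.filter_sublist

theorem pydis_iff {α : Type} [BEq α] [LawfulBEq α] (xs : List α) :
    ((PySem.Set.ofList xs).length == xs.length) = true ↔ xs.Nodup := by
  constructor
  · intro h
    have := (ofList_sublist xs).eq_of_length (by simpa using h)
    rw [← this]; exact PySem.Set.nodup_ofList xs
  · intro h
    rw [PySem.Set.ofList_eq_self_of_nodup xs h]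
    simp

-- a fold whose step is the identity on every element
theorem foldl_id {α β : Type} (f : β → α → β) (ts : List α) (acc : β)
    (h : ∀ s t, t ∈ ts → f s t = s) : ts.foldl f acc = acc := by
  induction ts generalizing acc with
  | nil => rfl
  | cons t ts ih => rw [List.foldl_cons, h _ _ (by simp), ih _ (fun s t ht => h s t (by simp [ht]))]

theorem foldl_flatMap {α β γ : Type} (l : List α) (f : α → List β) (g : γ → β → γ) (acc : γ) :
    (l.flatMap f).foldl g acc = l.foldl (fun a x => (f x).foldl g a) acc := by
  induction l generalizing acc with
  | nil => rfl
  | cons x xs ih => rw [List.flatMap_cons, List.foldl_append, List.foldl_cons, ih]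

theorem pvDfsRow_eq_foldl (l : List String) (ls : List (List String)) (used : List String)
    (res : PySem.Set (List String)) :
    pvDfsRow l ls used res
      = l.foldl (fun r u => if used.contains u then r else pvDfs ls (used ++ [u]) r) res := by
  induction l generalizing res with
  | nil => simp [pvDfsRow]
  | cons u l ih => rw [pvDfsRow, List.foldl_cons, ih]

-- MAIN INVARIANT: the DFS over the remaining candidate lists computes exactly A's fold
-- over the cartesian product of those lists, relative to the already-chosen (duplicate-free) prefix
theorem dfs_eq_foldl (arrs : List (List String)) (used : List String)
    (res : PySem.Set (List String)) (hnd : used.Nodup) :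
    pvDfs arrs used res
      = (pyProduct arrs).foldl
          (fun s t =>
            if (PySem.Set.ofList (used ++ t)).length == (used ++ t).length
            then PySem.Set.add s (PySem.List.sorted (used ++ t) (fun x => x) false)
            else s)
          res := by
  induction arrs generalizing used res with
  | nil =>
    simp only [pyProduct, List.foldl_cons, List.foldl_nil, List.append_nil, pvDfs]
    rw [if_pos ((pydis_iff used).mpr hnd)]
  | cons l ls ih =>
    rw [pvDfs, pvDfsRow_eq_foldl]
    show _ = (l.flatMap fun x => (pyProduct ls).map (x :: ·)).foldl _ _
    rw [foldl_flatMap]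
    refine PySem.List.foldl_congr_mem _ _ _ _ (fun acc u hu => ?_)
    rw [List.foldl_map]
    by_cases hmem : u ∈ used
    · rw [if_pos (by simp [hmem])]
      refine (foldl_id _ _ _ (fun s t _ => ?_)).symm
      rw [if_neg]
      intro hlen
      have : (used ++ u :: t).Nodup := (pydis_iff _).mp hlen
      rw [List.nodup_append] at this
      exact this.2.2 u hmem u (by exact List.mem_cons_self ..) rfl
    · rw [if_neg (fun hc => hmem (by simpa using hc))]
      have hnd' : (used ++ [u]).Nodup := by
        rw [List.nodup_append]
        refine ⟨hnd, List.nodup_singleton u, ?_⟩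
        intro a ha b hb
        rw [List.mem_singleton] at hb
        subst hb
        exact fun h => hmem (h ▸ ha)
      rw [ih (used ++ [u]) _ hnd']
      refine PySem.List.foldl_congr_mem _ _ _ _ (fun acc t _ => ?_)
      simp [List.append_assoc]

-- ===== VERDICT (by name: the statement is the Claim_ definition above) =====
theorem solution_spec : Claim_equal_solution := by
  intro user_id banned_id _
  show solution user_id banned_id = solution_alt user_id banned_id
  unfold solution solution_alt
  rw [arrs_eq, List.nil_append,
      dfs_eq_foldl _ [] PySem.Set.empty List.nodup_nil]
  simp only [List.nil_append]
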